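-- pv_equiv track=rewrite | github.com/devju94/baekjoon-solutions | solutions/s1_9519.py | solution
-- ===== SOURCE A (Python) =====
-- from collections import deque
--
-- def closeEye(word):
--     frontQ = deque()
--     backQ = deque()
--     newWord = ''
--
--     # 홀수인덱스는 그대로, 짝수인덱스는 역순으로 큐에 삽입
--     for i in range(len(word)):
--         if(i % 2 == 0):
--             frontQ.append(word[i])
--         else:
--             backQ.appendleft(word[i])
--
--     # front, back 순으로 모두 popleft하여 이어붙이기
--     while(frontQ):
--         newWord += frontQ.popleft()
--     while(backQ):
--         newWord += backQ.popleft()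
--
--     return newWord
--
-- def solution(X, word):
--     # cnt(원래대로 돌아오는 반복 횟수) 값 계산
--     cnt = 1
--     tempWord = closeEye(word)
--     while(tempWord != word):
--         tempWord = closeEye(tempWord)
--         cnt += 1
--
--     # X값을 cnt로 나눈 나머지로 조정
--     X %= cnt
--
--     # X가 0이면 그대로 반환
--     if(X == 0):
--         return word
--
--     # X만큼 반복
--     for i in range(X):
--         word = closeEye(word)
--
--     return word
-- ===== SOURCE B (Python) =====
-- def solution(X, word):
--     # Cycle decomposition of the index permutation behind closeEye:
--     # new[j] = word[p[j]] with p[j] = 2j for the front half, 2(n-j)-1 for the back half.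
--     # Each position only needs X modulo its own cycle length, so no global period search.
--     n = len(word)
--     p = [2 * j if 2 * j < n else 2 * (n - j) - 1 for j in range(n)]
--     out = []
--     for j in range(n):
--         # length of j's cycle under p
--         L = 1
--         t = p[j]
--         while t != j:
--             L += 1
--             t = p[t]
--         # walk X mod L steps along the cycle
--         k = X % L
--         t = j
--         for _ in range(k):
--             t = p[t]
--         out.append(word[t])
--     return ''.join(out)
-- ===== Notes on version B (the rewrite author's own statement) =====
-- stated objective: faster
-- what changed: B replaces A's global period search (repeatedly re-shuffling the whole word until it recurs, then shuffling X mod period more times) by a cycle decomposition of the fixed index permutation: each position reads its character directly X mod its own cycle length steps along its cycle, so no word-level iteration happens at all.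
import Mathlib
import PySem

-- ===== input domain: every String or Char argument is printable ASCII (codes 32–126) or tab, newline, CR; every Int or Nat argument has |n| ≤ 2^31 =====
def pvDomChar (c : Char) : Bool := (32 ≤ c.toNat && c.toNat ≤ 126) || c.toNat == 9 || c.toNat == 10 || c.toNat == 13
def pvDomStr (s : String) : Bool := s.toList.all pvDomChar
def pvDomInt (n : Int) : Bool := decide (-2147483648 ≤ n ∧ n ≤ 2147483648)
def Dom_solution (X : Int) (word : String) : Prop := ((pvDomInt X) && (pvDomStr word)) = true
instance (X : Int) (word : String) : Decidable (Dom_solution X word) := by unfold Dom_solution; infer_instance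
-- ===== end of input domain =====

-- B replaces A's global period search (repeatedly re-shuffling the whole word until it
-- recurs, then shuffling X-mod-period more times) by a cycle decomposition of the fixed
-- index permutation: each position reads its answer directly X-mod-its-own-cycle-length
-- steps along its cycle.

-- ===== PORT A =====
-- closeEye(word): even indices in order (frontQ), odd indices reversed (backQ), concatenated.
-- The two deque-draining while-loops are the two foldl's appending one character at a time.
def closeEye (l : List Char) : List Char :=
  let fb := (List.range l.length).foldl
    (fun (fb : List Char × List Char) i =>
      if i % 2 == 0 then (fb.1 ++ [l.getD i ' '], fb.2) else (fb.1, l.getD i ' ' :: fb.2))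
    ([], [])
  let nw := fb.1.foldl (fun s c => s ++ [c]) ([] : List Char)
  fb.2.foldl (fun s c => s ++ [c]) nw

-- the `while(tempWord != word)` counting loop; fuel (length ! + 1) provably suffices
-- (the permutation's order divides length !), proved below, so the 0-fuel branch is never taken.
def cntLoop (w : List Char) : Nat → List Char → Nat → Nat
  | 0, _, cnt => cnt
  | fuel+1, temp, cnt => if temp = w then cnt else cntLoop w fuel (closeEye temp) (cnt+1)

def solution (X : Int) (word : String) : String :=
  let w := word.toList
  let cnt := cntLoop w (Nat.factorial w.length + 1) (closeEye w) 1
  let X' := PySem.Int.mod X (cnt : Int)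
  if X' = 0 then word
  else String.ofList ((List.range X'.toNat).foldl (fun acc _ => closeEye acc) w)

-- ===== PORT B =====
-- p = [2*j if 2*j < n else 2*(n-j)-1 for j in range(n)]
def pmapB (n : Nat) : List Nat := (List.range n).map (fun j => if 2*j < n then 2*j else 2*(n-j)-1)

-- the `while t != j` cycle-length loop of Source B; fuel (n ! + 1) provably suffices (see below).
def cycLen (p : List Nat) (j : Nat) : Nat → Nat → Nat → Nat
  | 0, _, L => L
  | fuel+1, t, L => if t = j then L else cycLen p j fuel (p.getD t 0) (L+1)

def solution_alt (X : Int) (word : String) : String :=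
  let w := word.toList
  let n := w.length
  let p := pmapB n
  String.ofList ((List.range n).map (fun j =>
    let L := cycLen p j (Nat.factorial n + 1) (p.getD j 0) 1
    let k := (PySem.Int.mod X (L : Int)).toNat
    let t := (List.range k).foldl (fun t _ => p.getD t 0) j
    w.getD t ' '))

-- ===== PRECONDITION & SPEC =====
def Spec_solution (X : Int) (word : String) (out : String) : Prop := out = solution_alt X word
instance (X : Int) (word : String) (out : String) : Decidable (Spec_solution X word out) := by unfold Spec_solution; infer_instance

-- ===== CLAIM (what is proved, stated in full; the proofs are below) =====
def Claim_equal_solution : Prop := ∀ (X : Int) (word : String), Dom_solution X word → Spec_solution X word (solution X word)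

-- ===== LEMMAS AND PROOFS =====

-- the index permutation behind closeEye: new[j] = old[pidx n j]
def pidx (n j : Nat) : Nat := if 2*j < n then 2*j else 2*(n-j)-1

theorem closeEye_fold (l : List Char) (n : Nat) :
    (List.range n).foldl
      (fun (fb : List Char × List Char) i =>
        if i % 2 == 0 then (fb.1 ++ [l.getD i ' '], fb.2) else (fb.1, l.getD i ' ' :: fb.2))
      ([], []) =
    ((List.range ((n+1)/2)).map (fun j => l.getD (2*j) ' '),
     ((List.range (n/2)).map (fun j => l.getD (2*j+1) ' ')).reverse) := by
  induction n with
  | zero => rfl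
  | succ n ih =>
    rw [List.range_succ, List.foldl_append, ih, List.foldl_cons, List.foldl_nil]
    by_cases hpar : n % 2 = 0
    · have h1 : (n+1+1)/2 = (n+1)/2 + 1 := by omega
      have h2 : (n+1)/2 = n/2 := by omega
      simp only [hpar]
      rw [h1, h2, List.range_succ, List.map_append]
      have : 2 * (n/2) = n := by omega
      simp [this]
    · have h0 : (n % 2 == 0) = false := by simp [hpar]
      have h1 : (n+1+1)/2 = (n+1)/2 := by omega
      have h2 : (n+1)/2 = n/2 + 1 := by omega
      simp only [h0]
      rw [h1, h2]
      have : 2 * (n/2) + 1 = n := by omega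
      simp [List.range_succ, this]

theorem closeEye_eq (l : List Char) :
    closeEye l = (List.range l.length).map (fun j => l.getD (pidx l.length j) ' ') := by
  unfold closeEye
  rw [closeEye_fold]
  simp only [PySem.List.foldl_append_singleton_eq_self, List.nil_append]
  set n := l.length with hn
  apply List.ext_getElem
  · simp; omega
  · intro i h1 h2
    simp only [List.getElem_map, List.getElem_range]
    by_cases hi : i < (n+1)/2
    · rw [List.getElem_append_left (by simpa using hi)]
      simp only [List.getElem_map, List.getElem_range]
      unfold pidx
      rw [if_pos (by omega)]
    · rw [List.getElem_append_right (by simpa using hi)]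
      simp only [List.getElem_reverse, List.getElem_map, List.getElem_range, List.length_map,
        List.length_range]
      unfold pidx
      rw [if_neg (by simp at h1; omega)]
      congr 1
      simp at h1
      omega

theorem pidx_lt {n j : Nat} (h : j < n) : pidx n j < n := by unfold pidx; split <;> omega
theorem closeEye_len (l : List Char) : (closeEye l).length = l.length := by rw [closeEye_eq]; simp
theorem iter_len (k : Nat) (l : List Char) : (closeEye^[k] l).length = l.length := by
  induction k with
  | zero => rfl
  | succ k ih => rw [Function.iterate_succ_apply', closeEye_len, ih]

theorem iter_char (k : Nat) (l : List Char) {j : Nat} (h : j < l.length) :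
    (closeEye^[k] l).getD j ' ' = l.getD ((pidx l.length)^[k] j) ' ' := by
  induction k generalizing j with
  | zero => rfl
  | succ k ih =>
    rw [Function.iterate_succ_apply', closeEye_eq, iter_len,
      PySem.List.getD_map_range _ _ _ _ h, ih (pidx_lt h), Function.iterate_succ_apply]

theorem pit_lt {n : Nat} (k : Nat) {j : Nat} (h : j < n) : (pidx n)^[k] j < n := by
  induction k generalizing j with
  | zero => simpa using h
  | succ k ih => rw [Function.iterate_succ_apply]; exact ih (pidx_lt h)

theorem iter_eq_map (k : Nat) (l : List Char) :
    closeEye^[k] l = (List.range l.length).map (fun j => l.getD ((pidx l.length)^[k] j) ' ') := by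
  apply List.ext_getElem
  · simp [iter_len]
  · intro i h1 h2
    have hi : i < l.length := by simpa [iter_len] using h1
    simp only [List.getElem_map, List.getElem_range]
    rw [← List.getD_eq_getElem _ ' ' h1]
    exact iter_char k l hi

theorem pit_order {n j : Nat} (h : j < n) : (pidx n)^[Nat.factorial n] j = j := by
  let e : Equiv.Perm (Fin n) :=
    Equiv.ofBijective (fun j => ⟨pidx n j.1, pidx_lt j.2⟩) (by
      apply Finite.injective_iff_bijective.mp
      intro a b hab
      have : pidx n a.1 = pidx n b.1 := congrArg Fin.val hab
      unfold pidx at this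
      have ha := a.2; have hb := b.2
      apply Fin.ext
      split at this <;> split at this <;> omega)
  have key : ∀ (k : Nat) (x : Fin n), ((e ^ k) x).1 = (pidx n)^[k] x.1 := by
    intro k
    induction k with
    | zero => intro x; simp
    | succ k ih =>
      intro x
      rw [pow_succ', Equiv.Perm.mul_apply, Function.iterate_succ_apply']
      have : (e ((e ^ k) x)).1 = pidx n (((e ^ k) x)).1 := by
        simp [e, Equiv.ofBijective_apply]
      rw [this, ih]
  have hc : e ^ (Nat.factorial n) = 1 := by
    have hcard : Fintype.card (Equiv.Perm (Fin n)) = Nat.factorial n := by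
      simp [Fintype.card_perm]
    rw [← hcard]; exact pow_card_eq_one
  have hk := key (Nat.factorial n) ⟨j, h⟩
  rw [hc] at hk
  simpa using hk.symm

theorem iter_factorial (l : List Char) : closeEye^[Nat.factorial l.length] l = l := by
  rw [iter_eq_map]
  apply List.ext_getElem
  · simp
  · intro i h1 h2
    simp only [List.getElem_map, List.getElem_range]
    rw [pit_order (by simpa using h1), List.getD_eq_getElem _ _ h2]

theorem pit_mul {n j L : Nat} (hL : (pidx n)^[L] j = j) (q : Nat) : (pidx n)^[q * L] j = j := by
  induction q with
  | zero => simp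
  | succ q ih => rw [Nat.succ_mul, Function.iterate_add_apply, hL, ih]

theorem pit_mod {n j L : Nat} (hL : (pidx n)^[L] j = j) (a : Nat) :
    (pidx n)^[a] j = (pidx n)^[a % L] j := by
  conv_lhs => rw [← Nat.mod_add_div' a L]
  rw [Function.iterate_add_apply, pit_mul hL]

theorem iter_mul {P : Nat} {l : List Char} (hP : closeEye^[P] l = l) (q : Nat) :
    closeEye^[q * P] l = l := by
  induction q with
  | zero => simp
  | succ q ih => rw [Nat.succ_mul, Function.iterate_add_apply, hP, ih]

theorem iter_mod {P : Nat} {l : List Char} (hP : closeEye^[P] l = l) (a : Nat) :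
    closeEye^[a] l = closeEye^[a % P] l := by
  conv_lhs => rw [← Nat.mod_add_div' a P]
  rw [Function.iterate_add_apply, iter_mul hP]


-- generic: foldl of a constant step over range = iterate
theorem foldl_range_iterate {α : Type} (f : α → α) (k : Nat) (x : α) :
    (List.range k).foldl (fun a _ => f a) x = f^[k] x := by
  induction k with
  | zero => rfl
  | succ k ih => rw [List.range_succ, List.foldl_append, ih, List.foldl_cons, List.foldl_nil,
      Function.iterate_succ_apply']

-- existence of periods
theorem period_ex (l : List Char) : ∃ k, 0 < k ∧ closeEye^[k] l = l :=
  ⟨Nat.factorial l.length, Nat.factorial_pos _, iter_factorial l⟩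

theorem cyc_ex {n j : Nat} (h : j < n) : ∃ k, 0 < k ∧ (pidx n)^[k] j = j :=
  ⟨Nat.factorial n, Nat.factorial_pos _, pit_order h⟩

theorem pmap_getD {n t : Nat} (h : t < n) : (pmapB n).getD t 0 = pidx n t := by
  unfold pmapB pidx
  rw [PySem.List.getD_map_range _ _ _ _ h]

-- the two fuel loops compute the least periods
theorem cntLoop_spec (w : List Char) :
    ∀ fuel c, 0 < c → c ≤ Nat.find (period_ex w) → Nat.find (period_ex w) < c + fuel →
      cntLoop w fuel (closeEye^[c] w) c = Nat.find (period_ex w) := by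
  intro fuel
  induction fuel with
  | zero => intro c h1 h2 h3; omega
  | succ fuel ih =>
    intro c h1 h2 h3
    show (if closeEye^[c] w = w then c else cntLoop w fuel (closeEye (closeEye^[c] w)) (c+1)) = _
    by_cases he : closeEye^[c] w = w
    · rw [if_pos he]
      have := Nat.find_min' (period_ex w) ⟨h1, he⟩
      omega
    · rw [if_neg he]
      have hcP : c ≠ Nat.find (period_ex w) := fun hc => he (hc ▸ (Nat.find_spec (period_ex w)).2)
      rw [← Function.iterate_succ_apply' closeEye c w]
      exact ih (c+1) (by omega) (by omega) (by omega)

theorem cycLen_spec {n j : Nat} (h : j < n) :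
    ∀ fuel c, 0 < c → c ≤ Nat.find (cyc_ex h) → Nat.find (cyc_ex h) < c + fuel →
      cycLen (pmapB n) j fuel ((pidx n)^[c] j) c = Nat.find (cyc_ex h) := by
  intro fuel
  induction fuel with
  | zero => intro c h1 h2 h3; omega
  | succ fuel ih =>
    intro c h1 h2 h3
    show (if (pidx n)^[c] j = j then c
          else cycLen (pmapB n) j fuel ((pmapB n).getD ((pidx n)^[c] j) 0) (c+1)) = _
    by_cases he : (pidx n)^[c] j = j
    · rw [if_pos he]
      have := Nat.find_min' (cyc_ex h) ⟨h1, he⟩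
      omega
    · rw [if_neg he]
      have hcP : c ≠ Nat.find (cyc_ex h) := fun hc => he (hc ▸ (Nat.find_spec (cyc_ex h)).2)
      rw [pmap_getD (pit_lt c h), ← Function.iterate_succ_apply' (pidx n) c j]
      exact ih (c+1) (by omega) (by omega) (by omega)

-- walk along p = iterate of pidx
theorem walk_eq {n : Nat} (k : Nat) {j : Nat} (h : j < n) :
    (List.range k).foldl (fun t _ => (pmapB n).getD t 0) j = (pidx n)^[k] j := by
  induction k with
  | zero => rfl
  | succ k ih =>
    rw [List.range_succ, List.foldl_append, ih, List.foldl_cons, List.foldl_nil,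
      pmap_getD (pit_lt k h), Function.iterate_succ_apply']

-- ===== VERDICT (by name: the statement is the Claim_ definition above) =====
theorem mod_toNat_eq {X : Int} {a b : Nat} (ha : 0 < a) (hb : 0 < b) (hd : (a:Int) ∣ (b:Int)) :
    (X % (b:Int)).toNat % a = (PySem.Int.mod X (a:Int)).toNat := by
  have hb0 : ((b:Int)) ≠ 0 := by exact_mod_cast hb.ne'
  have ha0 : ((a:Int)) ≠ 0 := by exact_mod_cast ha.ne'
  have hma : PySem.Int.mod X (a:Int) = X % (a:Int) :=
    PySem.Int.mod_eq_emod_of_pos (by exact_mod_cast ha)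
  apply Nat.cast_injective (R := Int)
  push_cast [Int.natCast_mod]
  rw [Int.toNat_of_nonneg (Int.emod_nonneg X hb0), hma,
    Int.toNat_of_nonneg (Int.emod_nonneg X ha0), Int.emod_emod_of_dvd X hd]

theorem solution_spec : Claim_equal_solution := by
  unfold Claim_equal_solution Spec_solution
  intro X word _
  simp only [solution, solution_alt]
  set w := word.toList with hw
  set n := w.length with hn
  set P := Nat.find (period_ex w) with hPdef
  have hP1 : 0 < P := (Nat.find_spec (period_ex w)).1
  have hPw : closeEye^[P] w = w := (Nat.find_spec (period_ex w)).2
  have hPle : P ≤ Nat.factorial n :=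
    Nat.find_min' (period_ex w) ⟨Nat.factorial_pos _, iter_factorial w⟩
  have hcnt : cntLoop w (Nat.factorial n + 1) (closeEye w) 1 = P := by
    have := cntLoop_spec w (Nat.factorial n + 1) 1 (by omega) (by omega) (by omega)
    rwa [Function.iterate_one] at this
  rw [hcnt]
  set m1 := (PySem.Int.mod X (P : Int)).toNat with hm1
  have hA : (if PySem.Int.mod X (P:Int) = 0 then word
      else String.ofList ((List.range (PySem.Int.mod X (P:Int)).toNat).foldl
        (fun acc _ => closeEye acc) w)) = String.ofList (closeEye^[m1] w) := by
    split_ifs with h0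
    · rw [hm1, h0]
      simp [hw]
    · rw [foldl_range_iterate]
  rw [hA, iter_eq_map m1 w, ← hn]
  apply congrArg String.ofList
  apply List.map_congr_left
  intro j hj
  have hjn : j < n := List.mem_range.mp hj
  set Lj := Nat.find (cyc_ex hjn) with hLjdef
  have hLj1 : 0 < Lj := (Nat.find_spec (cyc_ex hjn)).1
  have hLjw : (pidx n)^[Lj] j = j := (Nat.find_spec (cyc_ex hjn)).2
  have hLjle : Lj ≤ Nat.factorial n :=
    Nat.find_min' (cyc_ex hjn) ⟨Nat.factorial_pos _, pit_order hjn⟩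
  have hLcyc : cycLen (pmapB n) j (Nat.factorial n + 1) ((pmapB n).getD j 0) 1 = Lj := by
    have := cycLen_spec hjn (Nat.factorial n + 1) 1 (by omega) (by omega) (by omega)
    rwa [Function.iterate_one, ← pmap_getD hjn] at this
  rw [hLcyc]
  set m2 := (PySem.Int.mod X (Lj : Int)).toNat with hm2
  rw [walk_eq m2 hjn]
  -- reduce both exponents modulo the respective periods via a common exponent N
  set N := (X % (((P * Lj : Nat)) : Int)).toNat with hN
  have hNP : N % P = m1 :=
    mod_toNat_eq hP1 (Nat.mul_pos hP1 hLj1) (by exact_mod_cast Dvd.intro Lj rfl)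
  have hNL : N % Lj = m2 :=
    mod_toNat_eq hLj1 (Nat.mul_pos hP1 hLj1) (by exact_mod_cast Dvd.intro_left P rfl)
  have e1 : (pidx n)^[m2] j = (pidx n)^[N] j := by rw [pit_mod hLjw N, hNL]
  rw [e1, ← iter_char N w hjn, ← iter_char m1 w hjn, iter_mod hPw N, hNP]
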